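-- pv_equiv track=rewrite | github.com/LukasMFR/crypto-maths-ds | crypto.py | _expr_to_string
-- ===== SOURCE A (Python) =====
-- def _expr_to_string(expr, R):
--     terms = []
--     for i in range(len(R)):
--         c = expr.get(i, 0)
--         if c != 0:
--             terms.append("{}*{}".format(c, R[i]))
--     if not terms:
--         return "0"
--     return " + ".join(terms)
-- ===== SOURCE B (Python) =====
-- def _expr_to_string(expr, R):
--     # Iterate the sparse dict's own items instead of scanning every index of R,
--     # keep in-range nonzero terms, sort by index to restore ascending order.
--     kept = [(i, c) for i, c in expr.items() if 0 <= i < len(R) and c != 0]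
--     kept.sort(key=lambda t: t[0])
--     if not kept:
--         return "0"
--     return " + ".join("{}*{}".format(c, R[i]) for i, c in kept)
-- ===== Notes on version B (the rewrite author's own statement) =====
-- stated objective: alternative
-- what changed: B walks the dict's stored items once (filter to in-range nonzero coefficients, sort by index, format, join) instead of A's dense scan over range(len(R)) with a dict probe at every index.
import Mathlib
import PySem

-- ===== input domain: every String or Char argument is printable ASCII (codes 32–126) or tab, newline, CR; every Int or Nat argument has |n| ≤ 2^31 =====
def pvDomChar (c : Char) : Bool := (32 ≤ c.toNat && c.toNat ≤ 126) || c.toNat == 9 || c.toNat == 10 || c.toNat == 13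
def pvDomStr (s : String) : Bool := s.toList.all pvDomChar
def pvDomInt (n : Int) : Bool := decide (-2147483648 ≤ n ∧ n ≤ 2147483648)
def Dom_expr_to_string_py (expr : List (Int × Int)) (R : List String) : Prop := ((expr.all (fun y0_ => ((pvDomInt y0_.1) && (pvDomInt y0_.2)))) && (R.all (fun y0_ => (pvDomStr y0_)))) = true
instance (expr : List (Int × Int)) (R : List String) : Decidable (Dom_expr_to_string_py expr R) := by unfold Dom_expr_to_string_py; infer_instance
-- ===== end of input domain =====

-- B iterates the dict's stored items (filter, sort by index, format, join) instead of
-- A's dense index scan with a per-index dict probe; alternative decomposition, not faster.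


-- ===== PORT A =====
-- expr.get(i, 0) on the association list: first-match lookup (List.lookup) with default 0.
def expr_to_string_py (expr : List (Int × Int)) (R : List String) : String :=
  let terms : List String := (PySem.List.pyRange 0 (R.length : Int)).foldl
    (fun terms i =>
      let c : Int := (List.lookup i expr).getD 0
      -- R[i] is always in range here (i ∈ range(len(R))), so pyGetD is exact
      if c ≠ 0 then terms ++ [PySem.Int.toStr c ++ "*" ++ PySem.List.pyGetD R i ""] else terms)
    []
  if terms = [] then "0" else PySem.Str.join " + " terms

-- ===== PORT B =====
def expr_to_string_py_alt (expr : List (Int × Int)) (R : List String) : String :=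
  let kept := expr.filter (fun p => decide (0 ≤ p.1) && decide (p.1 < (R.length : Int)) && (p.2 != 0))
  let sortedKept := PySem.List.sorted kept (fun p => p.1)
  if sortedKept = [] then "0"
  else PySem.Str.join " + "
    -- R[i] is in range for every kept pair, so pyGetD is exact
    (sortedKept.map (fun p => PySem.Int.toStr p.2 ++ "*" ++ PySem.List.pyGetD R p.1 ""))

-- ===== PRECONDITION & SPEC =====
-- Pre_ states the Python-dict representation invariant: the association list stands for a
-- dict, so its keys are distinct (a Python dict can never present duplicate keys).
def Pre_expr_to_string_py (expr : List (Int × Int)) (R : List String) : Prop :=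
  (expr.map Prod.fst).Nodup
instance (expr : List (Int × Int)) (R : List String) : Decidable (Pre_expr_to_string_py expr R) := by
  unfold Pre_expr_to_string_py; infer_instance

def pvWitness_expr_to_string_py : (List (Int × Int)) × List String :=
  ([((0 : Int), (2 : Int)), ((3 : Int), (1 : Int))], ["x", "y"])

def Spec_expr_to_string_py (expr : List (Int × Int)) (R : List String) (out : String) : Prop :=
  out = expr_to_string_py_alt expr R
instance (expr : List (Int × Int)) (R : List String) (out : String) : Decidable (Spec_expr_to_string_py expr R out) := by
  unfold Spec_expr_to_string_py; infer_instance

-- ===== CLAIM (what is proved, stated in full; the proofs are below) =====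
def Claim_equal_expr_to_string_py : Prop := ∀ (expr : List (Int × Int)) (R : List String), Dom_expr_to_string_py expr R → Pre_expr_to_string_py expr R → Spec_expr_to_string_py expr R (expr_to_string_py expr R)

-- ===== LEMMAS AND PROOFS =====

-- the canonical list of surviving (index, coefficient) pairs, in ascending index order
def pvCanon (expr : List (Int × Int)) (n : Nat) : List (Int × Int) :=
  (List.range n).filterMap (fun k : Nat =>
    (List.lookup (k : Int) expr).bind (fun c => if c ≠ 0 then some ((k : Int), c) else none))

lemma pv_lookup_iff_mem {expr : List (Int × Int)} (h : (expr.map Prod.fst).Nodup)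
    (i c : Int) : List.lookup i expr = some c ↔ (i, c) ∈ expr := by
  induction expr with
  | nil => simp
  | cons p t ih =>
    obtain ⟨j, d⟩ := p
    simp only [List.map_cons, List.nodup_cons, List.mem_map] at h
    by_cases hij : i = j
    · subst hij
      simp only [List.lookup, beq_self_eq_true, List.mem_cons, Option.some.injEq,
        Prod.mk.injEq]
      constructor
      · rintro rfl; exact Or.inl ⟨trivial, rfl⟩
      · rintro (⟨-, rfl⟩ | hm)
        · rfl
        · exact absurd ⟨(i, c), hm, rfl⟩ h.1
    · have hb : (i == j) = false := by simp [hij]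
      simp only [List.lookup, hb, List.mem_cons, Prod.mk.injEq]
      rw [ih h.2]
      constructor
      · exact Or.inr
      · rintro (⟨rfl, rfl⟩ | hm)
        · exact absurd rfl hij
        · exact hm

lemma pv_mem_canon {expr : List (Int × Int)} {n : Nat} {p : Int × Int} :
    p ∈ pvCanon expr n ↔
      List.lookup p.1 expr = some p.2 ∧ 0 ≤ p.1 ∧ p.1 < (n : Int) ∧ p.2 ≠ 0 := by
  obtain ⟨i, c⟩ := p
  simp only [pvCanon, List.mem_filterMap, Option.bind_eq_some_iff]
  constructor
  · rintro ⟨k, hk, d, hd, hif⟩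
    have hk' : k < n := List.mem_range.1 hk
    split_ifs at hif with hd0
    · have heq := Option.some.inj hif
      injection heq with h1 h2
      subst h1; subst h2
      exact ⟨hd, Int.natCast_nonneg k, by exact_mod_cast hk', hd0⟩
  · rintro ⟨hl, h0, hn, hc⟩
    obtain ⟨k, rfl⟩ : ∃ k : Nat, (k : Int) = i := ⟨i.toNat, Int.toNat_of_nonneg h0⟩
    exact ⟨k, List.mem_range.2 (by exact_mod_cast hn), c, hl, by simp [hc]⟩

lemma pv_canon_pairwise (expr : List (Int × Int)) (n : Nat) :
    (pvCanon expr n).Pairwise (fun a b => a.1 < b.1) := by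
  unfold pvCanon
  rw [List.pairwise_filterMap]
  refine (List.pairwise_lt_range (n := n)).imp ?_
  intro a a' hlt b hb b' hb'
  have ha : b.1 = (a : Int) := by
    rcases Option.bind_eq_some_iff.1 hb with ⟨d, -, hif⟩
    split_ifs at hif with hd
    · simpa using congrArg Prod.fst (Option.some.inj hif).symm
  have ha' : b'.1 = (a' : Int) := by
    rcases Option.bind_eq_some_iff.1 hb' with ⟨d, -, hif⟩
    split_ifs at hif with hd
    · simpa using congrArg Prod.fst (Option.some.inj hif).symm
  rw [ha, ha']; exact_mod_cast hlt

lemma pv_sorted_kept_eq_canon (expr : List (Int × Int)) (R : List String)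
    (h : (expr.map Prod.fst).Nodup) :
    PySem.List.sorted
      (expr.filter (fun p => decide (0 ≤ p.1) && decide (p.1 < (R.length : Int)) && (p.2 != 0)))
      (fun p => p.1) = pvCanon expr R.length := by
  apply PySem.List.sorted_eq_of_perm_of_pairwise_lt
  · have hsub := List.filter_sublist
      (p := fun p : Int × Int => decide (0 ≤ p.1) && decide (p.1 < (R.length : Int)) && (p.2 != 0))
      (l := expr)
    have hkeptnd : (expr.filter
        (fun p => decide (0 ≤ p.1) && decide (p.1 < (R.length : Int)) && (p.2 != 0))).Nodup :=
      List.Nodup.of_map Prod.fst ((hsub.map Prod.fst).nodup h)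
    have hcanonnd : (pvCanon expr R.length).Nodup :=
      (pv_canon_pairwise expr R.length).imp (fun {a b} hlt => by
        intro heq; rw [heq] at hlt; exact lt_irrefl _ hlt)
    rw [List.perm_ext_iff_of_nodup hcanonnd hkeptnd]
    intro p
    rw [pv_mem_canon, List.mem_filter, pv_lookup_iff_mem h]
    simp only [Bool.and_eq_true, decide_eq_true_eq, bne_iff_ne]
    tauto
  · exact pv_canon_pairwise expr R.length

lemma pv_fold_eq (expr : List (Int × Int)) (R : List String) (l : List Nat)
    (acc : List String) :
    l.foldl (fun (terms : List String) (k : Nat) =>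
        let c : Int := (List.lookup (k : Int) expr).getD 0
        if c ≠ 0 then terms ++ [PySem.Int.toStr c ++ "*" ++ PySem.List.pyGetD R (k : Int) ""]
        else terms) acc
    = acc ++ l.filterMap (fun k : Nat =>
        ((List.lookup (k : Int) expr).bind
            (fun c => if c ≠ 0 then some ((k : Int), c) else none)).map
          (fun p => PySem.Int.toStr p.2 ++ "*" ++ PySem.List.pyGetD R p.1 "")) := by
  induction l generalizing acc with
  | nil => simp
  | cons k t ih =>
    rw [List.foldl_cons, ih, List.filterMap_cons]
    cases hl : List.lookup (k : Int) expr with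
    | none => simp [hl]
    | some c => by_cases hc : c = 0 <;> simp [hl, hc, List.append_assoc]

lemma pv_terms_eq_canon_map (expr : List (Int × Int)) (R : List String) :
    (PySem.List.pyRange 0 (R.length : Int)).foldl
      (fun terms i =>
        let c : Int := (List.lookup i expr).getD 0
        if c ≠ 0 then terms ++ [PySem.Int.toStr c ++ "*" ++ PySem.List.pyGetD R i ""] else terms)
      []
    = (pvCanon expr R.length).map
        (fun p => PySem.Int.toStr p.2 ++ "*" ++ PySem.List.pyGetD R p.1 "") := by
  rw [PySem.List.pyRange_zero_natCast, List.foldl_map, pv_fold_eq expr R, List.nil_append,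
    pvCanon, List.map_filterMap]

-- ===== VERDICT (by name: the statement is the Claim_ definition above) =====
theorem expr_to_string_py_spec : Claim_equal_expr_to_string_py := by
  intro expr R _hdom hpre
  unfold Spec_expr_to_string_py expr_to_string_py expr_to_string_py_alt
  rw [pv_terms_eq_canon_map expr R, ← pv_sorted_kept_eq_canon expr R hpre]
  by_cases hL : PySem.List.sorted
      (expr.filter (fun p => decide (0 ≤ p.1) && decide (p.1 < (R.length : Int)) && (p.2 != 0)))
      (fun p => p.1) = []
  · simp [hL]
  · simp [hL, List.map_eq_nil_iff]
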